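-- pv_equiv track=rewrite | github.com/stoq/stoq | stoqlib/lib/stringutils.py | next_value_for
-- ===== SOURCE A (Python) =====
-- def _increment(value):
--     # Make sure the new value is at least the same size the old one was.
--     # For example, this will make '009' become '010' instead of just '10'
--     return str(int(value) + 1).zfill(len(value))
--
-- def next_value_for(value):
--     """Generate the next value for value.
--
--     For instance 4 -> 5, 99 -> 100, A83 -> A84 etc::
--
--       >>> next_value_for('999')
--       '1000'
--       >>> next_value_for('1')
--       '2'
--       >>> next_value_for('abc')
--       'abd'
--       >>> next_value_for('XYZ')
--       'XZ0'
--       >>> next_value_for('AB00099')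
--       'AB00100'
--
--     :param unicode value:
--     :returns:
--     :rtype: unicode
--     """
--     if not value:
--         return '1'
--     if value.isdigit():
--         return _increment(value)
--
--     last = value[-1]
--     if last.isdigit():
--         l = ''
--         # Get the greatest part in the string's end that is a number.
--         # For instance: 'ABC123' will get '123'
--         for c in reversed(value):
--             if not c.isdigit():
--                 break
--             l = c + l
--         value = value[:-len(l)] + _increment(l)
--     elif last.isalpha():
--         last = chr(ord(last) + 1)
--         if last.isalpha():
--             value = value[:-1] + last
--         else:
--             value_len = len(value)
--             value = next_value_for(value[:-1])
--             # If the next_value_for didn't increased the string length, we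
--             # need to. For instance: 'ABZ' would make the line above return
--             # 'AC' and thus the next value for the sequence is 'AC0'. It should
--             # be fine for '99Z' because it would generate '100'
--             if len(value) <= value_len:
--                 value += '0'
--     else:
--         value += '0'
--
--     return value
-- ===== SOURCE B (Python) =====
-- def next_value_for(value):
--     """Generate the next value for value (iterative version).
--
--     Scans from the right: trailing overflow letters ('z'/'Z') are peeled
--     off and counted, the remaining prefix is incremented in one step
--     (digit run, plain letter, or '0'-append), and each peeled letter
--     becomes a trailing '0' unless that step already grew the string.
--     """
--     if not value:
--         return '1'
--     chars = value
--     carries = 0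
--     while chars and chars[-1] in 'zZ':
--         chars = chars[:-1]
--         carries += 1
--     if not chars:
--         out = '1'
--     else:
--         last = chars[-1]
--         if last.isdigit():
--             i = len(chars)
--             while i > 0 and chars[i - 1].isdigit():
--                 i -= 1
--             run = chars[i:]
--             out = chars[:i] + str(int(run) + 1).zfill(len(run))
--         elif last.isalpha():
--             out = chars[:-1] + chr(ord(last) + 1)
--         else:
--             out = chars + '0'
--     want = len(chars)
--     for _ in range(carries):
--         want += 1
--         if len(out) <= want:
--             out += '0'
--     return out
-- ===== Notes on version B (the rewrite author's own statement) =====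
-- stated objective: alternative
-- what changed: Replaces A's recursive carry cascade (next_value_for calling itself on the prefix) by a single right-to-left scan: an explicit loop peels and counts the trailing overflow letters (lower/upper z), the remaining prefix is incremented in one non-recursive step, and a final carry loop replays the append-a-zero length fixup once per peeled letter.
import Mathlib
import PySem

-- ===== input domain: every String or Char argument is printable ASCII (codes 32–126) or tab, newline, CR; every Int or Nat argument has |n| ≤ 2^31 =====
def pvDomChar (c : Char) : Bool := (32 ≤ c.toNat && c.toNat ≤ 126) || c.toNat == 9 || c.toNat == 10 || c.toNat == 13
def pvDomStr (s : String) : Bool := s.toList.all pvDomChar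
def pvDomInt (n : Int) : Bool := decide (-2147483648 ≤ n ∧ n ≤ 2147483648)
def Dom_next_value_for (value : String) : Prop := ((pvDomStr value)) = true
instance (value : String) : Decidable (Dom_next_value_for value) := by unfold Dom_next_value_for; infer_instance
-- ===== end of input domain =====

-- B replaces A's prefix recursion by a single right-to-left scan: it peels and counts the
-- trailing overflow letters (lower/upper z), increments the remaining prefix in one step,
-- and replays the length-preservation fixup in an explicit carry loop (objective: alternative).

-- ===== PORT A =====

-- _increment(value) = str(int(value) + 1).zfill(len(value));
-- int() cannot raise where A calls it (nonempty all-digit argument), so the none arm is unreachable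
def pvIncrementA (v : List Char) : List Char :=
  match PySem.Int.ofChars? v with
  | none => []
  | some n => PySem.Chars.zfill (PySem.Int.toChars (n + 1)) (v.length : Int)

-- 'for c in reversed(value): if not c.isdigit(): break; l = c + l' (applied to value.reverse)
def pvDigitTailA : List Char → List Char → List Char
  | [], acc => acc
  | c :: rest, acc =>
    if PySem.Chars.isdigit c then pvDigitTailA rest (c :: acc) else acc

def pvCoreA (l : List Char) : List Char :=
  if hl : l = [] then ['1']
  else if PySem.Chars.strIsdigit l then pvIncrementA l
  else
    let last := PySem.List.pyGetD l (-1) ' '       -- value[-1]; in range: l ≠ []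
    if PySem.Chars.isdigit last then
      let t := pvDigitTailA l.reverse []
      PySem.List.slice l none (some (-(t.length : Int))) ++ pvIncrementA t
    else if PySem.Chars.isalpha last then
      let last' := Char.ofNat (last.toNat + 1)     -- chr(ord(last) + 1)
      if PySem.Chars.isalpha last' then
        l.dropLast ++ [last']                      -- value[:-1] + last  (slice_to_neg_one)
      else
        let r := pvCoreA l.dropLast                -- next_value_for(value[:-1])
        if r.length ≤ l.length then r ++ ['0'] else r
    else l ++ ['0']
termination_by l.length
decreasing_by
  have : 0 < l.length := List.length_pos_iff.mpr hl
  simp [List.length_dropLast]; omega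

def next_value_for (value : String) : String :=
  String.ofList (pvCoreA value.toList)

-- ===== PORT B =====

-- 'while chars and chars[-1] in "zZ": chars = chars[:-1]; carries += 1'
def pvPeelB (cs : List Char) (carries : Nat) : List Char × Nat :=
  if hcs : cs = [] then (cs, carries)
  else if PySem.List.pyGetD cs (-1) ' ' = 'z' ∨ PySem.List.pyGetD cs (-1) ' ' = 'Z' then
    pvPeelB cs.dropLast (carries + 1)
  else (cs, carries)
termination_by cs.length
decreasing_by
  have : 0 < cs.length := List.length_pos_iff.mpr hcs
  simp [List.length_dropLast]; omega

-- 'while i > 0 and chars[i-1].isdigit(): i -= 1'  (chars[i-1] is in range under the guard)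
def pvRunStartB (cs : List Char) : Nat → Nat
  | 0 => 0
  | i + 1 =>
    if PySem.Chars.isdigit (PySem.List.pyGetD cs (i : Int) ' ') then pvRunStartB cs i
    else i + 1

-- 'for _ in range(carries): want += 1; if len(out) <= want: out += "0"'
def pvCarryB (out : List Char) (want : Nat) : Nat → List Char
  | 0 => out
  | k + 1 =>
    pvCarryB (if out.length ≤ want + 1 then out ++ ['0'] else out) (want + 1) k

def pvCoreB (l : List Char) : List Char :=
  if l = [] then ['1']
  else
    let p := pvPeelB l 0
    let cs := p.1
    let out :=
      if h : cs = [] then ['1']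
      else
        let last := cs.getLast h                                -- chars[-1]
        if PySem.Chars.isdigit last then
          let i := pvRunStartB cs cs.length
          let run := PySem.List.slice cs (some (i : Int)) none  -- chars[i:]
          PySem.List.slice cs none (some (i : Int)) ++          -- chars[:i]
            (match PySem.Int.ofChars? run with                  -- str(int(run)+1).zfill(len(run))
             | none => []
             | some n => PySem.Chars.zfill (PySem.Int.toChars (n + 1)) (run.length : Int))
        else if PySem.Chars.isalpha last then
          cs.dropLast ++ [Char.ofNat (last.toNat + 1)]          -- chars[:-1] + chr(ord(last)+1)
        else cs ++ ['0']
    pvCarryB out cs.length p.2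

def next_value_for_alt (value : String) : String :=
  String.ofList (pvCoreB value.toList)

-- ===== PRECONDITION & SPEC =====
def Spec_next_value_for (value : String) (out : String) : Prop := out = next_value_for_alt value
instance (value : String) (out : String) : Decidable (Spec_next_value_for value out) := by unfold Spec_next_value_for; infer_instance

-- ===== CLAIM (what is proved, stated in full; the proofs are below) =====
def Claim_equal_next_value_for : Prop := ∀ (value : String), Dom_next_value_for value → Spec_next_value_for value (next_value_for value)

-- ===== LEMMAS AND PROOFS =====

-- Characters: a Char whose toNat equals another's is that Char
theorem pvCharEq (a b : Char) (h : a.toNat = b.toNat) : a = b := by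
  cases a; cases b
  simp only [Char.toNat] at h
  congr 1
  exact UInt32.toNat_inj.mp h

theorem pvAlphaNat (c : Char) : PySem.Chars.isalpha c = true ↔
    (65 ≤ c.toNat ∧ c.toNat ≤ 90) ∨ (97 ≤ c.toNat ∧ c.toNat ≤ 122) := by
  simp only [PySem.Chars.isalpha, PySem.Chars.isupper, PySem.Chars.islower, Char.le_def,
    UInt32.le_iff_toNat_le, Bool.or_eq_true, Bool.and_eq_true, decide_eq_true_eq]
  rfl

theorem pvDigitNat (c : Char) : PySem.Chars.isdigit c = true ↔
    (48 ≤ c.toNat ∧ c.toNat ≤ 57) := by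
  simp only [PySem.Chars.isdigit, Char.le_def, UInt32.le_iff_toNat_le,
    Bool.and_eq_true, decide_eq_true_eq]
  rfl

theorem pvSuccNat (c : Char) (h : c.toNat ≤ 125) :
    (Char.ofNat (c.toNat + 1)).toNat = c.toNat + 1 := by
  rw [Char.toNat_ofNat, if_pos]
  left; omega

-- a letter other than 'z'/'Z' still has a letter as its successor
theorem pvAlphaSucc (c : Char) (ha : PySem.Chars.isalpha c = true)
    (hz : ¬(c = 'z' ∨ c = 'Z')) : PySem.Chars.isalpha (Char.ofNat (c.toNat + 1)) = true := by
  rw [pvAlphaNat] at ha ⊢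
  push_neg at hz
  have h90 : c.toNat ≠ 90 := fun h => hz.2 (pvCharEq _ _ h)
  have h122 : c.toNat ≠ 122 := fun h => hz.1 (pvCharEq _ _ h)
  rw [pvSuccNat c (by omega)]
  omega

theorem pvDigitNotZ (c : Char) (hd : PySem.Chars.isdigit c = true) : ¬(c = 'z' ∨ c = 'Z') := by
  rw [pvDigitNat] at hd
  rintro (rfl | rfl) <;> simp_all

-- L1: the reversed-scan loop of A collects the reversed digit prefix of its argument
theorem pvDigitTailA_eq (xs acc : List Char) :
    pvDigitTailA xs acc = (xs.takeWhile PySem.Chars.isdigit).reverse ++ acc := by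
  induction xs generalizing acc with
  | nil => simp [pvDigitTailA]
  | cons c rest ih =>
    by_cases h : PySem.Chars.isdigit c <;>
      simp [pvDigitTailA, h, ih]

-- L2: B's descending index loop stops at the start of the trailing digit run
theorem pvRunStartB_eq (cs : List Char) (i : Nat) (hi : i ≤ cs.length) :
    pvRunStartB cs i = i - ((cs.take i).reverse.takeWhile PySem.Chars.isdigit).length := by
  induction i with
  | zero => simp [pvRunStartB]
  | succ i ih =>
    have hlt : i < cs.length := hi
    have hget : PySem.List.pyGetD cs (i : Int) ' ' = cs[i] := by
      simp [PySem.List.pyGetD_natCast, List.getD_eq_getElem?_getD, hlt]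
    have htake : (cs.take (i + 1)).reverse = cs[i] :: (cs.take i).reverse := by
      rw [List.take_add_one]
      simp [hlt]
    rw [pvRunStartB, hget, htake]
    by_cases h : PySem.Chars.isdigit cs[i]
    · have hlen : ((cs.take i).reverse.takeWhile PySem.Chars.isdigit).length ≤ i := by
        have h1 := (List.takeWhile_sublist (l := (cs.take i).reverse) PySem.Chars.isdigit).length_le
        simpa [List.length_reverse, List.length_take, Nat.min_eq_left (Nat.le_of_lt hlt)] using h1
      rw [if_pos h, ih (Nat.le_of_lt hlt), List.takeWhile_cons, if_pos h]
      simp only [List.length_cons]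
      omega
    · rw [if_neg h, List.takeWhile_cons, if_neg h]
      simp

-- L3b: peeling an overflow letter steps the loop
theorem pvPeelB_concat_z (P : List Char) (c : Char) (k : Nat) (hc : c = 'z' ∨ c = 'Z') :
    pvPeelB (P ++ [c]) k = pvPeelB P (k + 1) := by
  rw [pvPeelB]
  simp [PySem.List.pyGetD_neg_one_append_singleton, hc]

-- L3c: any other last character stops the loop at once
theorem pvPeelB_concat_nz (P : List Char) (c : Char) (k : Nat) (hc : ¬(c = 'z' ∨ c = 'Z')) :
    pvPeelB (P ++ [c]) k = (P ++ [c], k) := by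
  rw [pvPeelB]
  simp [PySem.List.pyGetD_neg_one_append_singleton, hc]

-- L3a: the carry counter is a pure accumulator
theorem pvPeelB_acc (n : Nat) : ∀ (cs : List Char) (k : Nat), cs.length ≤ n →
    pvPeelB cs k = ((pvPeelB cs 0).1, (pvPeelB cs 0).2 + k) := by
  induction n with
  | zero =>
    intro cs k hl
    have : cs = [] := List.length_eq_zero_iff.mp (Nat.le_zero.mp hl)
    subst this
    simp [pvPeelB]
  | succ n ih =>
    intro cs k hl
    by_cases hcs : cs = []
    · subst hcs; simp [pvPeelB]
    · rw [pvPeelB, dif_neg hcs]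
      conv_rhs => rw [pvPeelB, dif_neg hcs]
      by_cases hc : PySem.List.pyGetD cs (-1) ' ' = 'z' ∨ PySem.List.pyGetD cs (-1) ' ' = 'Z'
      · rw [if_pos hc, if_pos hc]
        have hlen : cs.dropLast.length ≤ n := by
          have h1 := @List.length_dropLast _ cs
          omega
        rw [ih cs.dropLast (k+1) hlen, ih cs.dropLast 1 hlen]
        simp only [Prod.mk.injEq, true_and]
        omega
      · rw [if_neg hc, if_neg hc]
        simp

-- L3d: peeled prefix length plus peel count is the original length
theorem pvPeelB_len (n : Nat) : ∀ (cs : List Char) (k : Nat), cs.length ≤ n →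
    (pvPeelB cs k).1.length + (pvPeelB cs k).2 = cs.length + k := by
  induction n with
  | zero =>
    intro cs k hl
    have : cs = [] := List.length_eq_zero_iff.mp (Nat.le_zero.mp hl)
    subst this
    simp [pvPeelB]
  | succ n ih =>
    intro cs k hl
    by_cases hcs : cs = []
    · subst hcs; simp [pvPeelB]
    · rw [pvPeelB, dif_neg hcs]
      by_cases hc : PySem.List.pyGetD cs (-1) ' ' = 'z' ∨ PySem.List.pyGetD cs (-1) ' ' = 'Z'
      · rw [if_pos hc]
        have hpos : 0 < cs.length := List.length_pos_iff.mpr hcs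
        have hlen : cs.dropLast.length ≤ n := by
          have h1 := @List.length_dropLast _ cs
          omega
        have := ih cs.dropLast (k + 1) hlen
        simp [List.length_dropLast] at this ⊢
        omega
      · rw [if_neg hc]

-- L4: the last iteration of B's carry loop can be split off at the end
theorem pvCarryB_succ (k : Nat) : ∀ (out : List Char) (want : Nat),
    pvCarryB out want (k + 1) =
      (if (pvCarryB out want k).length ≤ want + k + 1 then pvCarryB out want k ++ ['0']
       else pvCarryB out want k) := by
  induction k with
  | zero => intro out want; simp [pvCarryB]
  | succ k ih =>
    intro out want
    rw [pvCarryB, ih, pvCarryB]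
    have : want + 1 + k + 1 = want + (k + 1) + 1 := by omega
    rw [this]

-- the digit-suffix decomposition shared by both digit branches
theorem pvDecomp (l : List Char) :
    (l.reverse.dropWhile PySem.Chars.isdigit).reverse ++
      (l.reverse.takeWhile PySem.Chars.isdigit).reverse = l := by
  rw [← List.reverse_append, List.takeWhile_append_dropWhile, List.reverse_reverse]

-- A's value on a string ending in a digit
theorem pvCoreA_digit (P : List Char) (c : Char) (hd : PySem.Chars.isdigit c = true) :
    pvCoreA (P ++ [c]) =
      ((P ++ [c]).reverse.dropWhile PySem.Chars.isdigit).reverse ++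
        pvIncrementA (((P ++ [c]).reverse.takeWhile PySem.Chars.isdigit).reverse) := by
  have hne : P ++ [c] ≠ [] := by simp
  have hrev : (P ++ [c]).reverse = c :: P.reverse := by simp
  have hDT := pvDecomp (P ++ [c])
  rw [pvCoreA, dif_neg hne]
  by_cases hall : PySem.Chars.strIsdigit (P ++ [c]) = true
  · rw [if_pos hall]
    have hall' : ∀ x ∈ (P ++ [c]).reverse, PySem.Chars.isdigit x = true := by
      intro x hx
      rw [List.mem_reverse] at hx
      have := (Bool.and_eq_true _ _).mp hall
      exact (List.all_eq_true).mp this.2 x hx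
    rw [List.takeWhile_eq_self_iff.mpr hall', List.dropWhile_eq_nil_iff.mpr hall']
    simp
  · rw [if_neg hall]
    have hlast : PySem.List.pyGetD (P ++ [c]) (-1) ' ' = c :=
      PySem.List.pyGetD_neg_one_append_singleton _ _ _
    simp only [hlast, hd, if_pos]
    rw [pvDigitTailA_eq, List.append_nil]
    have hpos : 0 < (((P ++ [c]).reverse.takeWhile PySem.Chars.isdigit).reverse).length := by
      rw [hrev, List.takeWhile_cons, if_pos hd]
      simp
    rw [PySem.List.slice_to_neg_natCast _ _ hpos]
    generalize hT : ((P ++ [c]).reverse.takeWhile PySem.Chars.isdigit).reverse = t at *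
    generalize hD : ((P ++ [c]).reverse.dropWhile PySem.Chars.isdigit).reverse = D at *
    rw [← hDT, List.length_append, Nat.add_sub_cancel, List.take_left' rfl]

-- B's value on a string ending in a digit
theorem pvCoreB_digit (P : List Char) (c : Char) (hd : PySem.Chars.isdigit c = true) :
    pvCoreB (P ++ [c]) =
      ((P ++ [c]).reverse.dropWhile PySem.Chars.isdigit).reverse ++
        pvIncrementA (((P ++ [c]).reverse.takeWhile PySem.Chars.isdigit).reverse) := by
  have hne : P ++ [c] ≠ [] := by simp
  have hDT := pvDecomp (P ++ [c])
  rw [pvCoreB, if_neg hne, pvPeelB_concat_nz _ _ _ (pvDigitNotZ c hd)]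
  simp only
  rw [dif_neg hne]
  have hlast : (P ++ [c]).getLast hne = c := List.getLast_concat
  rw [hlast, if_pos hd]
  have hi : pvRunStartB (P ++ [c]) (P ++ [c]).length =
      (P ++ [c]).length - (((P ++ [c]).reverse.takeWhile PySem.Chars.isdigit).reverse).length := by
    rw [pvRunStartB_eq _ _ le_rfl, List.take_length, List.length_reverse]
  rw [hi]
  simp only [pvCarryB]
  generalize ((P ++ [c]).reverse.takeWhile PySem.Chars.isdigit).reverse = t at *
  generalize ((P ++ [c]).reverse.dropWhile PySem.Chars.isdigit).reverse = D at *
  rw [← hDT, List.length_append, Nat.add_sub_cancel, PySem.List.slice_from_natCast,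
    PySem.List.slice_to_natCast, List.drop_left' rfl, List.take_left' rfl]
  rw [pvIncrementA]

-- the main equivalence, by strong induction on the length
theorem pvCoreEq (n : Nat) : ∀ l : List Char, l.length ≤ n → pvCoreA l = pvCoreB l := by
  induction n with
  | zero =>
    intro l hl
    have : l = [] := List.length_eq_zero_iff.mp (Nat.le_zero.mp hl)
    subst this
    simp [pvCoreA, pvCoreB]
  | succ n ih =>
    intro l hl
    rcases List.eq_nil_or_concat l with rfl | ⟨P, c, rfl⟩
    · simp [pvCoreA, pvCoreB]
    rw [List.concat_eq_append] at hl ⊢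
    by_cases hd : PySem.Chars.isdigit c = true
    · rw [pvCoreA_digit P c hd, pvCoreB_digit P c hd]
    · have hd' : PySem.Chars.isdigit c = false := Bool.eq_false_iff.mpr hd
      have hne : P ++ [c] ≠ [] := by simp
      have hlastA : PySem.List.pyGetD (P ++ [c]) (-1) ' ' = c :=
        PySem.List.pyGetD_neg_one_append_singleton _ _ _
      have hlastB : (P ++ [c]).getLast hne = c := List.getLast_concat
      have hall : PySem.Chars.strIsdigit (P ++ [c]) = false := by
        simp [PySem.Chars.strIsdigit, hd']
      rw [pvCoreA, dif_neg hne, if_neg (by rw [hall]; exact Bool.false_ne_true), hlastA,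
        if_neg (by rw [hd']; exact Bool.false_ne_true)]
      by_cases ha : PySem.Chars.isalpha c = true
      · rw [if_pos ha]
        by_cases hz : c = 'z' ∨ c = 'Z'
        · -- overflow: A recurses on the prefix, B counts the peeled letter
          have hna : PySem.Chars.isalpha (Char.ofNat (c.toNat + 1)) = false := by
            rcases hz with rfl | rfl <;> decide
          rw [if_neg (by rw [hna]; exact Bool.false_ne_true), List.dropLast_concat]
          rw [pvCoreB, if_neg hne, pvPeelB_concat_z P c 0 hz,
            pvPeelB_acc P.length P 1 le_rfl]
          simp only
          rw [pvCarryB_succ]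
          have hplen := pvPeelB_len P.length P 0 le_rfl
          by_cases hP : P = []
          · subst hP
            have h0 : pvPeelB [] 0 = ([], 0) := by rw [pvPeelB]; rfl
            have hA0 : pvCoreA [] = ['1'] := by rw [pvCoreA]; rfl
            rw [h0, hA0]
            simp [pvCarryB]
          · have hPB : pvCoreB P = pvCarryB
                (if h : (pvPeelB P 0).1 = [] then ['1']
                 else
                  let last := (pvPeelB P 0).1.getLast h
                  if PySem.Chars.isdigit last then
                    let i := pvRunStartB (pvPeelB P 0).1 (pvPeelB P 0).1.length
                    let run := PySem.List.slice (pvPeelB P 0).1 (some (i : Int)) none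
                    PySem.List.slice (pvPeelB P 0).1 none (some (i : Int)) ++
                      (match PySem.Int.ofChars? run with
                       | none => []
                       | some m => PySem.Chars.zfill (PySem.Int.toChars (m + 1)) (run.length : Int))
                  else if PySem.Chars.isalpha last then
                    (pvPeelB P 0).1.dropLast ++ [Char.ofNat (last.toNat + 1)]
                  else (pvPeelB P 0).1 ++ ['0'])
                (pvPeelB P 0).1.length (pvPeelB P 0).2 := by
              rw [pvCoreB, if_neg hP]
            rw [ih P (by simp at hl; omega), hPB]
            have hlen2 : (P ++ [c]).length = (pvPeelB P 0).1.length + (pvPeelB P 0).2 + 1 := by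
              simp only [List.length_append, List.length_cons, List.length_nil]
              omega
            rw [hlen2]
        · -- a plain letter: both replace it by its successor
          have hs := pvAlphaSucc c ha hz
          rw [if_pos hs, List.dropLast_concat]
          rw [pvCoreB, if_neg hne, pvPeelB_concat_nz P c 0 hz]
          simp only
          rw [dif_neg hne, hlastB, if_neg (by rw [hd']; exact Bool.false_ne_true), if_pos ha,
            List.dropLast_concat]
          simp [pvCarryB]
      · -- not alphanumeric: both append '0'
        rw [if_neg ha]
        have hz : ¬(c = 'z' ∨ c = 'Z') := by
          rintro (rfl | rfl) <;> exact ha (by decide)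
        rw [pvCoreB, if_neg hne, pvPeelB_concat_nz P c 0 hz]
        simp only
        rw [dif_neg hne, hlastB, if_neg (by rw [hd']; exact Bool.false_ne_true), if_neg ha]
        simp [pvCarryB]

-- ===== VERDICT (by name: the statement is the Claim_ definition above) =====
theorem next_value_for_spec : Claim_equal_next_value_for := by
  intro value _
  show next_value_for value = next_value_for_alt value
  unfold next_value_for next_value_for_alt
  rw [pvCoreEq value.toList.length _ le_rfl]
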